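-- pv_equiv track=rewrite | github.com/danagle/advent-of-code-python | 2024/05/solution.py | check
-- ===== SOURCE A (Python) =====
-- def check(page_sequence, rules):
--     for i, page in enumerate(page_sequence):
--         if page in rules:
--             before = rules[page]
--             after = set(page_sequence[i+1:])
--             for prev_page in before:
--                 if prev_page in page_sequence and prev_page not in after:
--                     return False
--     return True
-- ===== SOURCE B (Python) =====
-- def check(page_sequence, rules):
--     # precompute last-occurrence index of every page; a rule is violated iff
--     # some required page's last occurrence is at or before the current index
--     last = {p: i for i, p in enumerate(page_sequence)}
--     for i, page in enumerate(page_sequence):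
--         if page in rules:
--             for q in rules[page]:
--                 if q in last and last[q] <= i:
--                     return False
--     return True
-- ===== Notes on version B (the rewrite author's own statement) =====
-- stated objective: faster
-- what changed: B builds a last-occurrence index map once and compares indices, instead of rebuilding a suffix set and scanning the whole sequence for membership at every position.
import Mathlib
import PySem

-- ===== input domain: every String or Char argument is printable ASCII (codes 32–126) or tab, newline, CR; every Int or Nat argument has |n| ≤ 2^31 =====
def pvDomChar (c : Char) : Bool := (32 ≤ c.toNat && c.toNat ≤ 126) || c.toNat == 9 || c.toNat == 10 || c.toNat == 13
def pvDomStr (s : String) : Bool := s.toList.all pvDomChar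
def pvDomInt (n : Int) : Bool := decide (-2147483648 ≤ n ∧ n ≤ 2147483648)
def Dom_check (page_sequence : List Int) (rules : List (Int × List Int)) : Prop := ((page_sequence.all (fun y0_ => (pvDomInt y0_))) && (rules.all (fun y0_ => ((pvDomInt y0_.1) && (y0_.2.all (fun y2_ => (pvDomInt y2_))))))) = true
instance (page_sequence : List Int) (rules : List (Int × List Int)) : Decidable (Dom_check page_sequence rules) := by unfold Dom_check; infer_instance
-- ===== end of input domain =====

-- B replaces A's per-position suffix-set rebuild + full-list membership scans by a
-- last-occurrence index map built once, comparing indices (objective: faster).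

-- ===== PORT A =====
-- the loop 'for i, page in enumerate(...)' with early 'return False'
def checkLoopA (ps : List Int) (rules : List (Int × List Int)) : List (Int × Int) → Bool
  | [] => true
  | (i, page) :: rest =>
    match (PySem.Dict.mk rules).get? page with      -- 'if page in rules: before = rules[page]'
    | some before =>
      let after := PySem.Set.ofList (PySem.List.slice ps (some (i + 1)) none)
      -- 'for prev_page in before: if … : return False'
      if before.any (fun q => ps.contains q && !(PySem.Set.contains after q)) then false
      else checkLoopA ps rules rest
    | none => checkLoopA ps rules rest

def check (page_sequence : List Int) (rules : List (Int × List Int)) : Bool :=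
  checkLoopA page_sequence rules (PySem.List.enumerate page_sequence)

-- ===== PORT B =====
-- 'last = {p: i for i, p in enumerate(page_sequence)}'
def lastDict (ps : List Int) : PySem.Dict Int Int :=
  (PySem.List.enumerate ps).foldl (fun d ip => d.insert ip.2 ip.1) PySem.Dict.empty

-- the second loop of B
def checkLoopB (rules : List (Int × List Int)) (last : PySem.Dict Int Int) : List (Int × Int) → Bool
  | [] => true
  | (i, page) :: rest =>
    match (PySem.Dict.mk rules).get? page with
    | some qs =>
      if qs.any (fun q => match last.get? q with
                          | some j => decide (j ≤ i)
                          | none => false) then false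
      else checkLoopB rules last rest
    | none => checkLoopB rules last rest

def check_alt (page_sequence : List Int) (rules : List (Int × List Int)) : Bool :=
  checkLoopB rules (lastDict page_sequence) (PySem.List.enumerate page_sequence)

-- ===== PRECONDITION & SPEC =====
def Spec_check (page_sequence : List Int) (rules : List (Int × List Int)) (out : Bool) : Prop := out = check_alt page_sequence rules
instance (page_sequence : List Int) (rules : List (Int × List Int)) (out : Bool) : Decidable (Spec_check page_sequence rules out) := by unfold Spec_check; infer_instance

-- ===== CLAIM (what is proved, stated in full; the proofs are below) =====
def Claim_equal_check : Prop := ∀ (page_sequence : List Int) (rules : List (Int × List Int)), Dom_check page_sequence rules → Spec_check page_sequence rules (check page_sequence rules)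

-- ===== LEMMAS AND PROOFS =====

-- index of the LAST occurrence of q in l (meaningful only when q ∈ l)
def lastIdxNat (q : Int) : List Int → Nat
  | [] => 0
  | _ :: xs => if q ∈ xs then lastIdxNat q xs + 1 else 0

theorem lastDict_get? (l : List Int) (s : Int) (d : PySem.Dict Int Int) (q : Int) :
    ((PySem.List.enumerate l s).foldl (fun d ip => d.insert ip.2 ip.1) d).get? q
      = if q ∈ l then some (s + (lastIdxNat q l : Int)) else d.get? q := by
  induction l generalizing s d with
  | nil => simp [PySem.List.enumerate_nil]
  | cons x xs ih =>
    rw [PySem.List.enumerate_cons]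
    simp only [List.foldl_cons, ih, lastIdxNat]
    by_cases hxs : q ∈ xs
    · simp only [hxs, if_true, List.mem_cons, or_true]
      congr 1
      push_cast
      ring
    · simp only [hxs]
      rw [PySem.Dict.get?_insert]
      by_cases hqx : q = x
      · subst hqx; simp [hxs]
      · simp [hxs, hqx, List.mem_cons]

theorem mem_drop_iff_lastIdx (q : Int) (l : List Int) (h : q ∈ l) (m : Nat) :
    q ∈ l.drop m ↔ m ≤ lastIdxNat q l := by
  induction l generalizing m with
  | nil => simp at h
  | cons x xs ih =>
    cases m with
    | zero => simpa using h
    | succ m' =>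
      simp only [List.drop_succ_cons, lastIdxNat]
      by_cases hxs : q ∈ xs
      · rw [ih hxs]
        simp [hxs]
      · have : q ∉ xs.drop m' := fun hc => hxs (List.mem_of_mem_drop hc)
        simp [hxs, this]

-- the pointwise equality of the two inner-loop tests at position k
theorem inner_eq (ps : List Int) (k : Nat) (q : Int) :
    (ps.contains q &&
      !(PySem.Set.contains (PySem.Set.ofList (PySem.List.slice ps (some ((k : Int) + 1)) none)) q))
    = (match (lastDict ps).get? q with
       | some j => decide (j ≤ (k : Int))
       | none => false) := by
  have hslice : PySem.List.slice ps (some ((k : Int) + 1)) none = ps.drop (k + 1) := by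
    have : ((k : Int) + 1) = ((k + 1 : Nat) : Int) := by push_cast; ring
    rw [this, PySem.List.slice_from_natCast]
  rw [hslice]
  unfold lastDict
  rw [lastDict_get? ps 0 PySem.Dict.empty q]
  by_cases h : q ∈ ps
  · have hdrop := mem_drop_iff_lastIdx q ps h (k + 1)
    simp only [h, if_true, zero_add]
    by_cases hle : lastIdxNat q ps ≤ k
    · have hmem : q ∉ ps.drop (k + 1) := by rw [hdrop]; omega
      have hle' : ((lastIdxNat q ps : Int) ≤ (k : Int)) := by exact_mod_cast hle
      simp [PySem.Set.mem_ofList, hmem, h, hle']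
    · have hmem : q ∈ ps.drop (k + 1) := by rw [hdrop]; omega
      have hle' : ¬ ((lastIdxNat q ps : Int) ≤ (k : Int)) := by
        intro hc; exact hle (by exact_mod_cast hc)
      simp [PySem.Set.mem_ofList, hmem, h, hle']
  · simp [h]

theorem loops_eq (ps : List Int) (rules : List (Int × List Int)) :
    ∀ (xs : List Int) (k : Nat),
      checkLoopA ps rules (PySem.List.enumerate xs (k : Int))
        = checkLoopB rules (lastDict ps) (PySem.List.enumerate xs (k : Int)) := by
  intro xs
  induction xs with
  | nil => intro k; simp [PySem.List.enumerate_nil, checkLoopA, checkLoopB]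
  | cons x rest ih =>
    intro k
    rw [PySem.List.enumerate_cons]
    simp only [checkLoopA, checkLoopB]
    have hnext : ((k : Int) + 1) = ((k + 1 : Nat) : Int) := by push_cast; ring
    cases hget : (PySem.Dict.mk rules).get? x with
    | none => dsimp only; rw [hnext]; exact ih (k + 1)
    | some before =>
      dsimp only
      have hany : (before.any (fun q => ps.contains q &&
          !(PySem.Set.contains (PySem.Set.ofList (PySem.List.slice ps (some ((k : Int) + 1)) none)) q)))
        = (before.any (fun q => match (lastDict ps).get? q with
             | some j => decide (j ≤ (k : Int))
             | none => false)) := by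
        exact List.any_congr rfl (fun q => inner_eq ps k q)
      rw [hany]
      by_cases hb : (before.any (fun q => match (lastDict ps).get? q with
             | some j => decide (j ≤ (k : Int))
             | none => false)) = true
      · simp [hb]
      · simp only [Bool.not_eq_true] at hb
        simp only [hb]
        rw [hnext]; exact ih (k + 1)

-- ===== VERDICT (by name: the statement is the Claim_ definition above) =====
theorem check_spec : Claim_equal_check := by
  intro ps rules _
  unfold Spec_check check check_alt
  have := loops_eq ps rules ps 0
  simpa using this
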